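-- pv_equiv track=rewrite | github.com/Winmini/CodingTest | Programmers/[1차] 프렌즈4블록.py | solution
-- ===== SOURCE A (Python) =====
-- def solution(m, n, board):
--     answer = 0
--     board = [list(i) for i in board]
--     chk = True
--     while(chk):
--         chk = False
--         erase = set()
--         for i in range(m-1):
--             for j in range(n-1):
--                 if board[i][j] != '0':
--                     if board[i][j] == board[i+1][j] == board[i][j+1] == board[i+1][j+1]:
--                         erase.add((i,j))
--                         erase.add((i+1,j))
--                         erase.add((i,j+1))
--                         erase.add((i+1,j+1))
--                         chk = True
--         for i, j in sorted(list(erase)):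
--             answer += 1
--             k = 1
--             while(i - k != -1):
--                 board[i-k+1][j] = board[i-k][j]
--                 k += 1
--             board[0][j] = '0'
--
--     return answer
-- ===== SOURCE B (Python) =====
-- def solution(m, n, board):
--     grid = [list(row) for row in board]
--     total = 0
--     while True:
--         erase = {(i + di, j + dj)
--                  for i in range(m - 1)
--                  for j in range(n - 1)
--                  if grid[i][j] != '0'
--                  and grid[i][j] == grid[i + 1][j] == grid[i][j + 1] == grid[i + 1][j + 1]
--                  for di in (0, 1) for dj in (0, 1)}
--         if not erase:
--             return total
--         total += len(erase)
--         for j in range(n):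
--             col = [grid[i][j] for i in range(m) if (i, j) not in erase]
--             col = ['0'] * (m - len(col)) + col
--             for i in range(m):
--                 grid[i][j] = col[i]
-- ===== Notes on version B (the rewrite author's own statement) =====
-- stated objective: simpler
-- what changed: Gravity is rebuilt per column in one pass (keep surviving cells in order, pad '0' on top) instead of bubbling every erased cell up its column one step at a time over a lexicographically sorted cell list; erased cells are counted in bulk with len(erase), the match scan becomes a single set comprehension, and the chk flag / while(chk) driver becomes while True / return.
-- outside the precondition, e.g. on solution(2, 2, ['aaa', 'aab']): A returns 4, B returns 4; on solution(3, 3, ['0000', 'BBA', 'BB', 'AAB']): A returns 4, B raises IndexError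
import Mathlib
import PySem

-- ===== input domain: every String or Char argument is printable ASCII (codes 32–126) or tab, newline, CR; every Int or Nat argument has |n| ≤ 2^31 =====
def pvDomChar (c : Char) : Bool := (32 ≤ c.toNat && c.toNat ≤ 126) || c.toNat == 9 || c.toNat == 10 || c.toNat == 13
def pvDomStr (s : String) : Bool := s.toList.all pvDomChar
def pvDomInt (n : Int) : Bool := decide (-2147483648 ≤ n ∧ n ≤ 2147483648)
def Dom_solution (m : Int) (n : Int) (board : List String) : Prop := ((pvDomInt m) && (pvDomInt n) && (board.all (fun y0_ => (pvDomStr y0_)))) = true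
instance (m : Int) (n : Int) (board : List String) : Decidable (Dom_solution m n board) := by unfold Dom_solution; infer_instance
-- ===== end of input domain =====

-- B rebuilds each column in one bulk pass (survivors kept in order, '0'-padding on top) and counts
-- erased cells with len(erase), instead of A's per-cell bubbling over a sorted cell list: simpler gravity.

-- board[i][j] and board[i][j] = v (indices always in range under Pre_; Python raises outside)
def pvCell (b : List (List Char)) (i j : Int) : Char :=
  PySem.List.pyGetD (PySem.List.pyGetD b i []) j '?'

def pvSetCell (b : List (List Char)) (i j : Int) (v : Char) : List (List Char) :=
  PySem.List.pySetD b i (PySem.List.pySetD (PySem.List.pyGetD b i []) j v)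

-- ===== PORT A =====
-- the double scan: chk flag and the erase set, four .add calls per match, exactly as in A
def pvScanA (m n : Int) (b : List (List Char)) : Bool × PySem.Set (Int × Int) :=
  (PySem.List.pyRange 0 (m-1) 1).foldl (fun st i =>
    (PySem.List.pyRange 0 (n-1) 1).foldl (fun st j =>
      if pvCell b i j ≠ '0' then
        if pvCell b i j = pvCell b (i+1) j ∧ pvCell b (i+1) j = pvCell b i (j+1) ∧
           pvCell b i (j+1) = pvCell b (i+1) (j+1) then
          (true, ((((st.2.add (i, j)).add (i+1, j)).add (i, j+1)).add (i+1, j+1)))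
        else st
      else st) st) (false, PySem.Set.empty)

-- while(i - k != -1): board[i-k+1][j] = board[i-k][j]; k += 1   (fuel i+1 is exact: the loop body runs i times)
def pvShiftA (b : List (List Char)) (i j k : Int) : Nat → List (List Char)
  | 0 => b
  | f+1 => if i - k ≠ -1 then pvShiftA (pvSetCell b (i-k+1) j (pvCell b (i-k) j)) i j (k+1) f else b

-- one iteration of "for i, j in sorted(list(erase))"
def pvGravA (st : Int × List (List Char)) (p : Int × Int) : Int × List (List Char) :=
  (st.1 + 1, pvSetCell (pvShiftA st.2 p.1 p.2 1 (p.1.toNat + 1)) 0 p.2 '0')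

-- while(chk): fuel m*n+1 is never exhausted (each chk-round erases ≥ 4 non-'0' cells)
def pvLoopA (m n : Int) : Nat → List (List Char) → Int → Int
  | 0, _, answer => answer
  | f+1, b, answer =>
    let s := pvScanA m n b
    let st := (PySem.List.sorted s.2 (fun p => toLex p) false).foldl pvGravA (answer, b)
    if s.1 then pvLoopA m n f st.2 st.1 else st.1

def solution (m : Int) (n : Int) (board : List String) : Int :=
  pvLoopA m n (m.toNat * n.toNat + 1) (board.map String.toList) 0

-- ===== PORT B =====
-- erase = {(i+di, j+dj) for i … for j … if match for di in (0,1) for dj in (0,1)}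
def pvScanB (m n : Int) (b : List (List Char)) : PySem.Set (Int × Int) :=
  (PySem.List.pyRange 0 (m-1) 1).foldl (fun er i =>
    (PySem.List.pyRange 0 (n-1) 1).foldl (fun er j =>
      if pvCell b i j ≠ '0' ∧ pvCell b i j = pvCell b (i+1) j ∧ pvCell b (i+1) j = pvCell b i (j+1) ∧
         pvCell b i (j+1) = pvCell b (i+1) (j+1) then
        ([((0:Int), (0:Int)), (0, 1), (1, 0), (1, 1)]).foldl (fun er d => er.add (i + d.1, j + d.2)) er
      else er) er) PySem.Set.empty

-- col = [grid[i][j] for i in range(m) if (i, j) not in erase]; pad '0's; write back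
def pvRebuildCol (m : Int) (er : PySem.Set (Int × Int)) (b : List (List Char)) (j : Int) : List (List Char) :=
  let col := ((PySem.List.pyRange 0 m 1).filter (fun i => !(er.contains (i, j)))).map (fun i => pvCell b i j)
  let col := List.replicate (m - (col.length : Int)).toNat '0' ++ col
  (PySem.List.pyRange 0 m 1).foldl (fun b i => pvSetCell b i j (PySem.List.pyGetD col i '?')) b

def pvLoopB (m n : Int) : Nat → List (List Char) → Int → Int
  | 0, _, total => total
  | f+1, b, total =>
    let er := pvScanB m n b
    if er.isEmpty then total
    else pvLoopB m n f ((PySem.List.pyRange 0 n 1).foldl (pvRebuildCol m er) b) (total + (er.length : Int))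

def solution_alt (m : Int) (n : Int) (board : List String) : Int :=
  pvLoopB m n (m.toNat * n.toNat + 1) (board.map String.toList) 0

-- ===== PRECONDITION & SPEC =====
-- Pre_: either the grid is trivially small (m ≤ 1 or n ≤ 1: no 2x2 window exists, neither program
-- touches the board and both return 0), or the board is exactly m rows of length n (the problem's
-- shape guarantee). On other inconsistent shapes A raises IndexError whenever the scan or the
-- gravity pass touches a missing cell; Pre_ also excludes some mis-shaped inputs on which A happens
-- to return (extra rows/columns the scan never reaches), see the cites in the claim.
def Pre_solution (m : Int) (n : Int) (board : List String) : Prop :=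
  (m ≤ 1 ∨ n ≤ 1) ∨ (m = (board.length : Int) ∧ ∀ s ∈ board, PySem.Str.len s = n)
instance (m : Int) (n : Int) (board : List String) : Decidable (Pre_solution m n board) := by
  unfold Pre_solution; infer_instance

def pvWitness_solution : Int × Int × List String := (2, 2, ["aa", "ab"])

def Spec_solution (m : Int) (n : Int) (board : List String) (out : Int) : Prop := out = solution_alt m n board
instance (m : Int) (n : Int) (board : List String) (out : Int) : Decidable (Spec_solution m n board out) := by
  unfold Spec_solution; infer_instance

-- ===== CLAIM (what is proved, stated in full; the proofs are below) =====
def Claim_equal_solution : Prop := ∀ (m : Int) (n : Int) (board : List String), Dom_solution m n board → Pre_solution m n board → Spec_solution m n board (solution m n board)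

-- ===== LEMMAS AND PROOFS =====

-- ===== proof-side abstractions =====
def pvColOf (b : List (List Char)) (j : Int) : List Char :=
  b.map (fun row => PySem.List.pyGetD row j '?')

def pvShp (M N : Nat) (b : List (List Char)) : Prop :=
  b.length = M ∧ ∀ r ∈ b, r.length = N

theorem pvGetD_nil (j : Int) : PySem.List.pyGetD ([] : List Char) j '?' = '?' := by
  simp [PySem.List.pyGetD, PySem.List.pyGet?]

theorem pvCell_col (b : List (List Char)) (i j : Int) :
    pvCell b i j = PySem.List.pyGetD (pvColOf b j) i '?' := by
  unfold pvCell pvColOf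
  have h := PySem.List.pyGetD_map (fun row => PySem.List.pyGetD row j '?') b i []
  rw [pvGetD_nil] at h
  exact h.symm

theorem pvLength_col (b : List (List Char)) (j : Int) : (pvColOf b j).length = b.length := by
  simp [pvColOf]

theorem pvShp_setCell {M N : Nat} {b : List (List Char)} {i j : Int} {v : Char}
    (hb : pvShp M N b) (hi0 : 0 ≤ i) (hiM : i < (M : Int)) :
    pvShp M N (pvSetCell b i j v) := by
  obtain ⟨hlen, hrow⟩ := hb
  unfold pvSetCell
  refine ⟨by rw [PySem.List.length_pySetD, hlen], ?_⟩
  intro r hr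
  rw [PySem.List.pySetD_of_nonneg _ _ hi0] at hr
  rcases List.mem_or_eq_of_mem_set hr with h | h
  · exact hrow r h
  · subst h
    rw [PySem.List.length_pySetD]
    have hi' : i < (b.length : Int) := by rw [hlen]; exact hiM
    rw [PySem.List.pyGetD_eq_getElem b ([]) hi0 hi']
    exact hrow _ (List.getElem_mem _)
theorem pvColOf_setCell {N : Nat} {b : List (List Char)} {i j : Int} {v : Char}
    (hrow : ∀ r ∈ b, r.length = N)
    (hi0 : 0 ≤ i) (hiM : i < (b.length : Int)) (hj0 : 0 ≤ j) (hjN : j < (N : Int))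
    (j' : Int) (hj'0 : 0 ≤ j') :
    pvColOf (pvSetCell b i j v) j' =
      if j' = j then (pvColOf b j).set i.toNat v else pvColOf b j' := by
  unfold pvSetCell
  rw [PySem.List.pySetD_of_nonneg _ _ hi0]
  unfold pvColOf
  rw [List.map_set]
  have hbi : PySem.List.pyGetD b i ([] : List Char) = b[i.toNat] :=
    PySem.List.pyGetD_eq_getElem b _ hi0 hiM
  have hlen : (b[i.toNat]'(by omega)).length = N := hrow _ (List.getElem_mem _)
  have hjj : j = ((j.toNat : Nat) : Int) := by omega
  have hj'j : j' = ((j'.toNat : Nat) : Int) := by omega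
  have hkey : PySem.List.pyGetD (PySem.List.pySetD (PySem.List.pyGetD b i []) j v) j' '?'
      = if j'.toNat = j.toNat then v else PySem.List.pyGetD (b[i.toNat]'(by omega)) j' '?' := by
    rw [hbi, hjj, hj'j, PySem.List.pyGetD_pySetD_natCast _ _ _ _ _ (by omega)]
    simp only [Int.toNat_natCast]
    rfl
  rw [hkey]
  by_cases h : j' = j
  · subst h
    simp
  · have hne : j'.toNat ≠ j.toNat := by omega
    rw [if_neg hne, if_neg h]
    have : PySem.List.pyGetD (b[i.toNat]'(by omega)) j' '?'
        = (List.map (fun row => PySem.List.pyGetD row j' '?') b)[i.toNat]'(by simp; omega) := by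
      simp
    rw [this, List.set_getElem_self]
def pvResCol (c : List Char) (t : Nat) : List Char := c.take 1 ++ c.take t ++ c.drop (t+1)

theorem pvResCol_zero (c : List Char) : pvResCol c 0 = c := by
  cases c <;> simp [pvResCol]

theorem pvGetEq (c : List Char) (a b : Nat) (ha : a < c.length) (hb : b < c.length) (h : a = b) :
    getElem c a ha = getElem c b hb := by subst h; rfl

theorem pvGetEq' (c d : List Char) {a : Nat} (ha : a < c.length) (hb : a < d.length) (h : c = d) :
    getElem c a ha = getElem d a hb := by subst h; rfl

theorem pvResCol_set (c : List Char) (t : Nat) (ht : t + 1 < c.length) :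
    pvResCol (c.set (t+1) (c.getD t '?')) t = pvResCol c (t+1) := by
  apply List.ext_getElem
  · simp [pvResCol]; omega
  · intro n h1 h2
    simp only [pvResCol, List.length_append, List.length_take, List.length_drop,
               List.length_set] at h1 h2
    simp only [pvResCol, List.getElem_append, List.length_append, List.length_take,
               List.length_set, List.getElem_take, List.getElem_drop, List.getElem_set]
    split_ifs <;>
      first
        | rfl
        | (rw [List.getD_eq_getElem c '?' (by omega)];
           exact pvGetEq c _ _ (by omega) (by omega) (by omega))
        | exact pvGetEq c _ _ (by omega) (by omega) (by omega)

theorem pvShiftA_spec {M N : Nat} : ∀ (t : Nat) (b : List (List Char)) (k i j : Int),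
    pvShp M N b → 0 ≤ j → j < (N : Int) → 1 ≤ k → i - k + 1 = (t : Int) → i < (M : Int) →
    pvShp M N (pvShiftA b i j k (t+1)) ∧
    ∀ j', 0 ≤ j' → pvColOf (pvShiftA b i j k (t+1)) j' =
      if j' = j then pvResCol (pvColOf b j) t else pvColOf b j' := by
  intro t
  induction t with
  | zero =>
    intro b k i j hb hj0 hjN hk ht hiM
    have hcond : ¬ (i - k ≠ -1) := by omega
    unfold pvShiftA
    rw [if_neg hcond]
    refine ⟨hb, fun j' _ => ?_⟩
    rw [pvResCol_zero]
    split <;> rename_i h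
    · rw [h]
    · rfl
  | succ t ih =>
    intro b k i j hb hj0 hjN hk ht hiM
    have hcond : (i - k ≠ -1) := by omega
    show pvShp M N (pvShiftA b i j k (t+1+1)) ∧ _
    unfold pvShiftA
    rw [if_pos hcond]
    set v := pvCell b (i-k) j with hv
    set b' := pvSetCell b (i-k+1) j v with hb'
    have hlenb : b.length = M := hb.1
    have hsh' : pvShp M N b' := pvShp_setCell hb (by omega) (by omega)
    have hrec := ih b' (k+1) i j hsh' hj0 hjN (by omega) (by omega) hiM
    refine ⟨hrec.1, fun j' hj'0 => ?_⟩
    rw [(hrec.2 j' hj'0)]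
    have hcolb' : ∀ jx, 0 ≤ jx → pvColOf b' jx =
        if jx = j then (pvColOf b j).set (t+1) v else pvColOf b jx := by
      intro jx hjx
      rw [hb', pvColOf_setCell hb.2 (by omega) (by omega) hj0 hjN jx hjx]
      have : (i - k + 1).toNat = t + 1 := by omega
      rw [this]
    by_cases hjj : j' = j
    · subst hjj
      rw [if_pos rfl, if_pos rfl, hcolb' j' hj'0, if_pos rfl]
      have hlc : (pvColOf b j').length = M := by rw [pvLength_col, hlenb]
      have hvc : v = (pvColOf b j').getD t '?' := by
        rw [hv, pvCell_col,
            PySem.List.pyGetD_eq_getElem _ '?' (by omega) (by rw [hlc]; omega)]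
        have hikt : (i - k).toNat = t := by omega
        simp only [hikt]
        rw [List.getD_eq_getElem _ '?' (by rw [hlc]; omega)]
      rw [hvc, pvResCol_set _ _ (by rw [hlc]; omega)]
    · rw [if_neg hjj, if_neg hjj, hcolb' j' hj'0, if_neg hjj]
theorem pvResCol_set_zero (c : List Char) (t : Nat) (hc : c ≠ []) :
    (pvResCol c t).set 0 '0' = '0' :: c.eraseIdx t := by
  obtain ⟨x, cs, rfl⟩ := List.exists_cons_of_ne_nil hc
  simp [pvResCol, List.eraseIdx_eq_take_drop_succ]

theorem pvGravA_spec {M N : Nat} {b : List (List Char)} {a : Int} {i j : Int}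
    (hb : pvShp M N b) (hi0 : 0 ≤ i) (hiM : i < (M : Int)) (hj0 : 0 ≤ j) (hjN : j < (N : Int)) :
    (pvGravA (a, b) (i, j)).1 = a + 1 ∧
    pvShp M N (pvGravA (a, b) (i, j)).2 ∧
    ∀ j', 0 ≤ j' → pvColOf (pvGravA (a, b) (i, j)).2 j' =
      if j' = j then '0' :: (pvColOf b j).eraseIdx i.toNat else pvColOf b j' := by
  have hti : i - 1 + 1 = ((i.toNat : Nat) : Int) := by omega
  have hsh := (pvShiftA_spec (M := M) (N := N) i.toNat b 1 i j hb hj0 hjN (by omega) hti hiM)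
  refine ⟨rfl, ?_, ?_⟩
  · exact pvShp_setCell hsh.1 (by omega) (by omega)
  · intro j' hj'0
    show pvColOf (pvSetCell (pvShiftA b i j 1 (i.toNat + 1)) 0 j '0') j' = _
    rw [pvColOf_setCell hsh.1.2 (by omega) (by rw [hsh.1.1]; omega) hj0 hjN j' hj'0]
    have hz : (0 : Int).toNat = 0 := rfl
    by_cases hjj : j' = j
    · subst hjj
      rw [if_pos rfl, if_pos rfl, hsh.2 j' hj'0, if_pos rfl, hz]
      exact pvResCol_set_zero _ _ (by
        intro hnil
        have h0 : (pvColOf b j').length = 0 := by rw [hnil]; rfl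
        rw [pvLength_col] at h0
        have hlb : b.length = M := hb.1
        omega)
    · rw [if_neg hjj, if_neg hjj, hsh.2 j' hj'0, if_neg hjj]

theorem pvGravFold {M N : Nat} : ∀ (pairs : List (Int × Int)) (a : Int) (b : List (List Char)),
    pvShp M N b →
    (∀ p ∈ pairs, 0 ≤ p.1 ∧ p.1 < (M : Int) ∧ 0 ≤ p.2 ∧ p.2 < (N : Int)) →
    (pairs.foldl pvGravA (a, b)).1 = a + pairs.length ∧
    pvShp M N (pairs.foldl pvGravA (a, b)).2 ∧
    ∀ j', 0 ≤ j' → pvColOf (pairs.foldl pvGravA (a, b)).2 j' =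
      (pairs.filter (fun p => p.2 == j')).foldl (fun c p => '0' :: c.eraseIdx p.1.toNat) (pvColOf b j') := by
  intro pairs
  induction pairs with
  | nil => intro a b hb _; exact ⟨by simp, hb, fun j' _ => by simp⟩
  | cons p rest ih =>
    intro a b hb hmem
    obtain ⟨i, j⟩ := p
    have hp := hmem (i, j) (by simp)
    dsimp only at hp
    have hg := pvGravA_spec (b := b) (a := a) hb hp.1 hp.2.1 hp.2.2.1 hp.2.2.2
    rw [List.foldl_cons]
    have hrec := ih (pvGravA (a, b) (i, j)).1 (pvGravA (a, b) (i, j)).2 hg.2.1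
      (fun q hq => hmem q (by simp [hq]))
    rw [Prod.mk.eta] at hrec
    refine ⟨?_, hrec.2.1, ?_⟩
    · rw [hrec.1, hg.1]; simp; omega
    · intro j' hj'0
      rw [hrec.2.2 j' hj'0, hg.2.2 j' hj'0, List.filter_cons]
      by_cases hjj : j = j'
      · subst hjj
        rw [if_pos rfl, if_pos (by simp), List.foldl_cons]
      · rw [if_neg (fun h => hjj h.symm), if_neg (by simp [hjj])]
def pvKeep (c : List Char) (f : Nat → Bool) : List Char :=
  ((List.range c.length).filter (fun q => !(f q))).map (fun q => c.getD q '?')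

theorem pvKeep_false (c : List Char) : pvKeep c (fun _ => false) = c := by
  unfold pvKeep
  simp only [Bool.not_false, List.filter_true]
  apply List.ext_getElem
  · simp
  · intro n h1 h2
    simp only [List.getElem_map, List.getElem_range]
    rw [List.getD_eq_getElem c '?' (by simpa using h2)]

theorem pvKeep_step (c : List Char) (r : Int) (rest : List Int)
    (hr0 : 0 ≤ r) (hrc : r < (c.length : Int)) (hgt : ∀ q ∈ rest, r < q) :
    pvKeep ('0' :: c.eraseIdx r.toNat) (fun q => decide ((q : Int) ∈ rest))
      = '0' :: pvKeep c (fun q => decide ((q : Int) ∈ r :: rest)) := by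
  unfold pvKeep
  have hL : ('0' :: c.eraseIdx r.toNat).length = c.length := by
    simp only [List.length_cons, List.length_eraseIdx]
    rw [if_pos (show r.toNat < c.length by omega)]
    omega
  rw [hL]
  have hsplit : List.range c.length =
      List.range (r.toNat + 1) ++ (List.range (c.length - (r.toNat + 1))).map (fun x => (r.toNat + 1) + x) := by
    rw [← List.range_add]; congr 1; omega
  rw [hsplit, List.filter_append, List.filter_append, List.map_append, List.map_append]
  -- left part, LHS: every q ≤ r.toNat survives the filter
  have hseg1L : (List.range (r.toNat + 1)).filter (fun (q : Nat) => !(decide ((q : Int) ∈ rest))) =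
      List.range (r.toNat + 1) := by
    apply List.filter_eq_self.mpr
    intro q hq
    simp only [List.mem_range] at hq
    simp only [Bool.not_eq_eq_eq_not, Bool.not_true, decide_eq_false_iff_not]
    intro hmem
    have := hgt _ hmem
    omega
  -- left part, RHS: q = r.toNat is dropped, the rest survives
  have hseg1R : (List.range (r.toNat + 1)).filter (fun (q : Nat) => !(decide ((q : Int) ∈ r :: rest))) =
      List.range r.toNat := by
    rw [List.range_succ, List.filter_append]
    have h1 : (List.range r.toNat).filter (fun (q : Nat) => !(decide ((q : Int) ∈ r :: rest))) =
        List.range r.toNat := by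
      apply List.filter_eq_self.mpr
      intro q hq
      simp only [List.mem_range] at hq
      simp only [Bool.not_eq_eq_eq_not, Bool.not_true, decide_eq_false_iff_not, List.mem_cons]
      rintro (h | hmem)
      · omega
      · have := hgt _ hmem; omega
    have h2 : ([r.toNat].filter (fun (q : Nat) => !(decide ((q : Int) ∈ r :: rest)))) = [] := by
      simp [List.mem_cons]
      omega
    rw [h1, h2, List.append_nil]
  rw [hseg1L, hseg1R]
  -- left maps
  have hmap1L : (List.range (r.toNat + 1)).map (fun q => ('0' :: c.eraseIdx r.toNat).getD q '?') =
      '0' :: (List.range r.toNat).map (fun q => c.getD q '?') := by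
    rw [List.range_succ_eq_map, List.map_cons]
    congr 1
    rw [List.map_map]
    apply List.map_congr_left
    intro q hq
    simp only [List.mem_range] at hq
    simp only [Function.comp_apply]
    have h1 : ('0' :: c.eraseIdx r.toNat).getD (q + 1) '?' = (c.eraseIdx r.toNat).getD q '?' := by
      rfl
    rw [show Nat.succ q = q + 1 from rfl, h1]
    rw [List.getD_eq_getElem _ '?'
          (by rw [List.length_eraseIdx, if_pos (show r.toNat < c.length by omega)]; omega),
        List.getD_eq_getElem _ '?' (by omega)]
    rw [List.getElem_eraseIdx_of_lt _ (by omega)]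
  rw [hmap1L]
  -- right segments agree elementwise
  have hseg2 : ((List.range (c.length - (r.toNat + 1))).map (fun x => (r.toNat + 1) + x)).filter
        (fun (q : Nat) => !(decide ((q : Int) ∈ rest))) =
      ((List.range (c.length - (r.toNat + 1))).map (fun x => (r.toNat + 1) + x)).filter
        (fun (q : Nat) => !(decide ((q : Int) ∈ r :: rest))) := by
    apply List.filter_congr
    intro q hq
    simp only [List.mem_map, List.mem_range] at hq
    obtain ⟨x, hx, rfl⟩ := hq
    simp only [List.mem_cons]
    congr 1
    rw [decide_eq_decide]
    constructor
    · intro h; exact Or.inr h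
    · rintro (h | h)
      · omega
      · exact h
  rw [← hseg2]
  -- and their maps agree on surviving indices (all ≥ r.toNat + 1)
  have hmap2 : (((List.range (c.length - (r.toNat + 1))).map (fun x => (r.toNat + 1) + x)).filter
        (fun (q : Nat) => !(decide ((q : Int) ∈ rest)))).map (fun q => ('0' :: c.eraseIdx r.toNat).getD q '?') =
      (((List.range (c.length - (r.toNat + 1))).map (fun x => (r.toNat + 1) + x)).filter
        (fun (q : Nat) => !(decide ((q : Int) ∈ rest)))).map (fun q => c.getD q '?') := by
    apply List.map_congr_left
    intro q hq
    have hq' := List.mem_of_mem_filter hq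
    simp only [List.mem_map, List.mem_range] at hq'
    obtain ⟨x, hx, rfl⟩ := hq'
    have h1 : ('0' :: c.eraseIdx r.toNat).getD (r.toNat + 1 + x) '?' =
        (c.eraseIdx r.toNat).getD (r.toNat + x) '?' := by
      rw [show r.toNat + 1 + x = (r.toNat + x) + 1 by omega]
      rfl
    rw [h1]
    rw [List.getD_eq_getElem _ '?'
          (by rw [List.length_eraseIdx, if_pos (show r.toNat < c.length by omega)]; omega),
        List.getD_eq_getElem _ '?' (by omega)]
    rw [List.getElem_eraseIdx_of_ge _ (by omega)]
    exact pvGetEq c _ _ _ _ (by omega)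
  rw [hmap2]
  simp

theorem pvCstepFold : ∀ (rows : List Int) (c : List Char),
    rows.Pairwise (· < ·) →
    (∀ r ∈ rows, 0 ≤ r ∧ r < (c.length : Int)) →
    rows.foldl (fun c r => '0' :: c.eraseIdx r.toNat) c
      = List.replicate rows.length '0' ++ pvKeep c (fun q => decide ((q : Int) ∈ rows)) := by
  intro rows
  induction rows with
  | nil =>
    intro c _ _
    simp only [List.foldl_nil, List.length_nil, List.replicate_zero, List.nil_append]
    rw [show (fun (q : Nat) => decide ((q : Int) ∈ ([] : List Int))) = (fun _ : Nat => false) by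
      funext q; simp]
    rw [pvKeep_false]
  | cons r rest ih =>
    intro c hpw hmem
    rw [List.foldl_cons]
    have hr := hmem r (by simp)
    have hL : ('0' :: c.eraseIdx r.toNat).length = c.length := by
      simp only [List.length_cons, List.length_eraseIdx]
      rw [if_pos (show r.toNat < c.length by omega)]
      omega
    have hrec := ih ('0' :: c.eraseIdx r.toNat) hpw.of_cons
      (fun q hq => by rw [hL]; exact hmem q (by simp [hq]))
    rw [hrec, pvKeep_step c r rest hr.1 hr.2 (fun q hq => List.rel_of_pairwise_cons hpw hq)]
    simp only [List.length_cons, List.replicate_succ', List.append_assoc, List.singleton_append]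
def pvCond (b : List (List Char)) (i j : Int) : Prop :=
  pvCell b i j ≠ '0' ∧ pvCell b i j = pvCell b (i+1) j ∧ pvCell b (i+1) j = pvCell b i (j+1) ∧
    pvCell b i (j+1) = pvCell b (i+1) (j+1)

def pvCells (i j : Int) (x : Int × Int) : Prop :=
  x = (i, j) ∨ x = (i+1, j) ∨ x = (i, j+1) ∨ x = (i+1, j+1)

theorem pvScanAInner (b : List (List Char)) (i : Int) :
    ∀ (js : List Int) (st : Bool × PySem.Set (Int × Int)), st.2.Nodup →
    (∀ x, x ∈ (js.foldl (fun st j =>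
      if pvCell b i j ≠ '0' then
        if pvCell b i j = pvCell b (i+1) j ∧ pvCell b (i+1) j = pvCell b i (j+1) ∧
           pvCell b i (j+1) = pvCell b (i+1) (j+1) then
          (true, ((((st.2.add (i, j)).add (i+1, j)).add (i, j+1)).add (i+1, j+1)))
        else st
      else st) st).2 ↔ x ∈ st.2 ∨ ∃ j ∈ js, pvCond b i j ∧ pvCells i j x) ∧
    ((js.foldl (fun st j =>
      if pvCell b i j ≠ '0' then
        if pvCell b i j = pvCell b (i+1) j ∧ pvCell b (i+1) j = pvCell b i (j+1) ∧
           pvCell b i (j+1) = pvCell b (i+1) (j+1) then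
          (true, ((((st.2.add (i, j)).add (i+1, j)).add (i, j+1)).add (i+1, j+1)))
        else st
      else st) st).1 = true ↔ st.1 = true ∨ ∃ j ∈ js, pvCond b i j) ∧
    (js.foldl (fun st j =>
      if pvCell b i j ≠ '0' then
        if pvCell b i j = pvCell b (i+1) j ∧ pvCell b (i+1) j = pvCell b i (j+1) ∧
           pvCell b i (j+1) = pvCell b (i+1) (j+1) then
          (true, ((((st.2.add (i, j)).add (i+1, j)).add (i, j+1)).add (i+1, j+1)))
        else st
      else st) st).2.Nodup := by
  intro js
  induction js with
  | nil => intro st hnd; exact ⟨fun x => by simp, by simp, hnd⟩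
  | cons j js ih =>
    intro st hnd
    rw [List.foldl_cons]
    by_cases c1 : pvCell b i j ≠ '0'
    · rw [if_pos c1]
      by_cases c2 : pvCell b i j = pvCell b (i+1) j ∧ pvCell b (i+1) j = pvCell b i (j+1) ∧
           pvCell b i (j+1) = pvCell b (i+1) (j+1)
      · rw [if_pos c2]
        have hnd' : (((((st.2.add (i, j)).add (i+1, j)).add (i, j+1)).add (i+1, j+1))).Nodup :=
          PySem.Set.nodup_add _ _ (PySem.Set.nodup_add _ _ (PySem.Set.nodup_add _ _
            (PySem.Set.nodup_add _ _ hnd)))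
        obtain ⟨ih1, ih2, ih3⟩ :=
          ih (true, ((((st.2.add (i, j)).add (i+1, j)).add (i, j+1)).add (i+1, j+1))) hnd'
        have hcnd : pvCond b i j := ⟨c1, c2⟩
        refine ⟨?_, ?_, ih3⟩
        · intro x
          rw [ih1]
          simp only [PySem.Set.mem_add]
          constructor
          · rintro (((((h | h) | h) | h) | h) | ⟨j', hj', hc, hx⟩)
            · exact Or.inl h
            · exact Or.inr ⟨j, List.mem_cons_self, hcnd, Or.inl h⟩
            · exact Or.inr ⟨j, List.mem_cons_self, hcnd, Or.inr (Or.inl h)⟩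
            · exact Or.inr ⟨j, List.mem_cons_self, hcnd, Or.inr (Or.inr (Or.inl h))⟩
            · exact Or.inr ⟨j, List.mem_cons_self, hcnd, Or.inr (Or.inr (Or.inr h))⟩
            · exact Or.inr ⟨j', List.mem_cons_of_mem _ hj', hc, hx⟩
          · rintro (h | ⟨j', hj', hc, hx⟩)
            · exact Or.inl (Or.inl (Or.inl (Or.inl (Or.inl h))))
            · rcases List.mem_cons.mp hj' with rfl | hj'
              · rcases hx with h | h | h | h
                · exact Or.inl (Or.inl (Or.inl (Or.inl (Or.inr h))))
                · exact Or.inl (Or.inl (Or.inl (Or.inr h)))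
                · exact Or.inl (Or.inl (Or.inr h))
                · exact Or.inl (Or.inr h)
              · exact Or.inr ⟨j', hj', hc, hx⟩
        · rw [ih2]
          constructor
          · intro _; exact Or.inr ⟨j, List.mem_cons_self, hcnd⟩
          · intro _; exact Or.inl rfl
      · rw [if_neg c2]
        have hnot : ¬ pvCond b i j := fun hc => c2 hc.2
        obtain ⟨ih1, ih2, ih3⟩ := ih st hnd
        refine ⟨?_, ?_, ih3⟩
        · intro x
          rw [ih1]
          constructor
          · rintro (h | ⟨j', hj', hc, hx⟩)
            · exact Or.inl h
            · exact Or.inr ⟨j', List.mem_cons_of_mem _ hj', hc, hx⟩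
          · rintro (h | ⟨j', hj', hc, hx⟩)
            · exact Or.inl h
            · rcases List.mem_cons.mp hj' with rfl | hj'
              · exact absurd hc hnot
              · exact Or.inr ⟨j', hj', hc, hx⟩
        · rw [ih2]
          constructor
          · rintro (h | ⟨j', hj', hc⟩)
            · exact Or.inl h
            · exact Or.inr ⟨j', List.mem_cons_of_mem _ hj', hc⟩
          · rintro (h | ⟨j', hj', hc⟩)
            · exact Or.inl h
            · rcases List.mem_cons.mp hj' with rfl | hj'
              · exact absurd hc hnot
              · exact Or.inr ⟨j', hj', hc⟩
    · rw [if_neg c1]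
      have hnot : ¬ pvCond b i j := fun hc => c1 hc.1
      obtain ⟨ih1, ih2, ih3⟩ := ih st hnd
      refine ⟨?_, ?_, ih3⟩
      · intro x
        rw [ih1]
        constructor
        · rintro (h | ⟨j', hj', hc, hx⟩)
          · exact Or.inl h
          · exact Or.inr ⟨j', List.mem_cons_of_mem _ hj', hc, hx⟩
        · rintro (h | ⟨j', hj', hc, hx⟩)
          · exact Or.inl h
          · rcases List.mem_cons.mp hj' with rfl | hj'
            · exact absurd hc hnot
            · exact Or.inr ⟨j', hj', hc, hx⟩
      · rw [ih2]
        constructor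
        · rintro (h | ⟨j', hj', hc⟩)
          · exact Or.inl h
          · exact Or.inr ⟨j', List.mem_cons_of_mem _ hj', hc⟩
        · rintro (h | ⟨j', hj', hc⟩)
          · exact Or.inl h
          · rcases List.mem_cons.mp hj' with rfl | hj'
            · exact absurd hc hnot
            · exact Or.inr ⟨j', hj', hc⟩
theorem pvScanAOuter (b : List (List Char)) (n : Int) :
    ∀ (is : List Int) (st : Bool × PySem.Set (Int × Int)), st.2.Nodup →
    (∀ x, x ∈ (is.foldl (fun st i =>
    (PySem.List.pyRange 0 (n-1) 1).foldl (fun st j =>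
      if pvCell b i j ≠ '0' then
        if pvCell b i j = pvCell b (i+1) j ∧ pvCell b (i+1) j = pvCell b i (j+1) ∧
           pvCell b i (j+1) = pvCell b (i+1) (j+1) then
          (true, ((((st.2.add (i, j)).add (i+1, j)).add (i, j+1)).add (i+1, j+1)))
        else st
      else st) st) st).2 ↔ x ∈ st.2 ∨
        ∃ i ∈ is, ∃ j ∈ PySem.List.pyRange 0 (n-1) 1, pvCond b i j ∧ pvCells i j x) ∧
    ((is.foldl (fun st i =>
    (PySem.List.pyRange 0 (n-1) 1).foldl (fun st j =>
      if pvCell b i j ≠ '0' then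
        if pvCell b i j = pvCell b (i+1) j ∧ pvCell b (i+1) j = pvCell b i (j+1) ∧
           pvCell b i (j+1) = pvCell b (i+1) (j+1) then
          (true, ((((st.2.add (i, j)).add (i+1, j)).add (i, j+1)).add (i+1, j+1)))
        else st
      else st) st) st).1 = true ↔ st.1 = true ∨
        ∃ i ∈ is, ∃ j ∈ PySem.List.pyRange 0 (n-1) 1, pvCond b i j) ∧
    (is.foldl (fun st i =>
    (PySem.List.pyRange 0 (n-1) 1).foldl (fun st j =>
      if pvCell b i j ≠ '0' then
        if pvCell b i j = pvCell b (i+1) j ∧ pvCell b (i+1) j = pvCell b i (j+1) ∧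
           pvCell b i (j+1) = pvCell b (i+1) (j+1) then
          (true, ((((st.2.add (i, j)).add (i+1, j)).add (i, j+1)).add (i+1, j+1)))
        else st
      else st) st) st).2.Nodup := by
  intro is
  induction is with
  | nil => intro st hnd; exact ⟨fun x => by simp, by simp, hnd⟩
  | cons i is ih =>
    intro st hnd
    rw [List.foldl_cons]
    obtain ⟨h1, h2, h3⟩ := pvScanAInner b i (PySem.List.pyRange 0 (n-1) 1) st hnd
    obtain ⟨ih1, ih2, ih3⟩ := ih _ h3
    refine ⟨?_, ?_, ih3⟩
    · intro x
      rw [ih1, h1 x]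
      constructor
      · rintro ((h | ⟨j', hj', hc, hx⟩) | ⟨i', hi', j', hj', hc, hx⟩)
        · exact Or.inl h
        · exact Or.inr ⟨i, List.mem_cons_self, j', hj', hc, hx⟩
        · exact Or.inr ⟨i', List.mem_cons_of_mem _ hi', j', hj', hc, hx⟩
      · rintro (h | ⟨i', hi', j', hj', hc, hx⟩)
        · exact Or.inl (Or.inl h)
        · rcases List.mem_cons.mp hi' with rfl | hi'
          · exact Or.inl (Or.inr ⟨j', hj', hc, hx⟩)
          · exact Or.inr ⟨i', hi', j', hj', hc, hx⟩
    · rw [ih2, h2]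
      constructor
      · rintro ((h | ⟨j', hj', hc⟩) | ⟨i', hi', j', hj', hc⟩)
        · exact Or.inl h
        · exact Or.inr ⟨i, List.mem_cons_self, j', hj', hc⟩
        · exact Or.inr ⟨i', List.mem_cons_of_mem _ hi', j', hj', hc⟩
      · rintro (h | ⟨i', hi', j', hj', hc⟩)
        · exact Or.inl (Or.inl h)
        · rcases List.mem_cons.mp hi' with rfl | hi'
          · exact Or.inl (Or.inr ⟨j', hj', hc⟩)
          · exact Or.inr ⟨i', hi', j', hj', hc⟩

theorem pvScanA_spec (m n : Int) (b : List (List Char)) :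
    (∀ x, x ∈ (pvScanA m n b).2 ↔
        ∃ i ∈ PySem.List.pyRange 0 (m-1) 1, ∃ j ∈ PySem.List.pyRange 0 (n-1) 1,
          pvCond b i j ∧ pvCells i j x) ∧
    ((pvScanA m n b).1 = true ↔
        ∃ i ∈ PySem.List.pyRange 0 (m-1) 1, ∃ j ∈ PySem.List.pyRange 0 (n-1) 1, pvCond b i j) ∧
    (pvScanA m n b).2.Nodup := by
  obtain ⟨h1, h2, h3⟩ := pvScanAOuter b n (PySem.List.pyRange 0 (m-1) 1)
    (false, PySem.Set.empty) List.nodup_nil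
  refine ⟨fun x => ?_, ?_, h3⟩
  · unfold pvScanA
    rw [h1 x]
    simp [PySem.Set.empty]
  · unfold pvScanA
    rw [h2]
    simp

theorem pvScanBInner (b : List (List Char)) (i : Int) :
    ∀ (js : List Int) (er : PySem.Set (Int × Int)), er.Nodup →
    (∀ x, x ∈ (js.foldl (fun er j =>
      if pvCell b i j ≠ '0' ∧ pvCell b i j = pvCell b (i+1) j ∧ pvCell b (i+1) j = pvCell b i (j+1) ∧
         pvCell b i (j+1) = pvCell b (i+1) (j+1) then
        ([((0:Int), (0:Int)), (0, 1), (1, 0), (1, 1)]).foldl (fun er d => er.add (i + d.1, j + d.2)) er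
      else er) er) ↔ x ∈ er ∨ ∃ j ∈ js, pvCond b i j ∧ pvCells i j x) ∧
    (js.foldl (fun er j =>
      if pvCell b i j ≠ '0' ∧ pvCell b i j = pvCell b (i+1) j ∧ pvCell b (i+1) j = pvCell b i (j+1) ∧
         pvCell b i (j+1) = pvCell b (i+1) (j+1) then
        ([((0:Int), (0:Int)), (0, 1), (1, 0), (1, 1)]).foldl (fun er d => er.add (i + d.1, j + d.2)) er
      else er) er).Nodup := by
  intro js
  induction js with
  | nil => intro er hnd; exact ⟨fun x => by simp, hnd⟩
  | cons j js ih =>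
    intro er hnd
    rw [List.foldl_cons]
    by_cases c : pvCell b i j ≠ '0' ∧ pvCell b i j = pvCell b (i+1) j ∧ pvCell b (i+1) j = pvCell b i (j+1) ∧
         pvCell b i (j+1) = pvCell b (i+1) (j+1)
    · rw [if_pos c]
      have hred : ([((0:Int), (0:Int)), (0, 1), (1, 0), (1, 1)]).foldl
          (fun er d => er.add (i + d.1, j + d.2)) er =
          (((er.add (i + 0, j + 0)).add (i + 0, j + 1)).add (i + 1, j + 0)).add (i + 1, j + 1) := rfl
      rw [hred]
      have hnd' : ((((er.add (i + 0, j + 0)).add (i + 0, j + 1)).add (i + 1, j + 0)).add (i + 1, j + 1)).Nodup :=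
        PySem.Set.nodup_add _ _ (PySem.Set.nodup_add _ _ (PySem.Set.nodup_add _ _
          (PySem.Set.nodup_add _ _ hnd)))
      obtain ⟨ih1, ih2⟩ := ih _ hnd'
      have hcnd : pvCond b i j := c
      refine ⟨?_, ih2⟩
      intro x
      rw [ih1]
      simp only [PySem.Set.mem_add, add_zero]
      constructor
      · rintro (((((h | h) | h) | h) | h) | ⟨j', hj', hc, hx⟩)
        · exact Or.inl h
        · exact Or.inr ⟨j, List.mem_cons_self, hcnd, Or.inl h⟩
        · exact Or.inr ⟨j, List.mem_cons_self, hcnd, Or.inr (Or.inr (Or.inl h))⟩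
        · exact Or.inr ⟨j, List.mem_cons_self, hcnd, Or.inr (Or.inl h)⟩
        · exact Or.inr ⟨j, List.mem_cons_self, hcnd, Or.inr (Or.inr (Or.inr h))⟩
        · exact Or.inr ⟨j', List.mem_cons_of_mem _ hj', hc, hx⟩
      · rintro (h | ⟨j', hj', hc, hx⟩)
        · exact Or.inl (Or.inl (Or.inl (Or.inl (Or.inl h))))
        · rcases List.mem_cons.mp hj' with rfl | hj'
          · rcases hx with h | h | h | h
            · exact Or.inl (Or.inl (Or.inl (Or.inl (Or.inr h))))
            · exact Or.inl (Or.inl (Or.inr h))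
            · exact Or.inl (Or.inl (Or.inl (Or.inr h)))
            · exact Or.inl (Or.inr h)
          · exact Or.inr ⟨j', hj', hc, hx⟩
    · rw [if_neg c]
      obtain ⟨ih1, ih2⟩ := ih er hnd
      refine ⟨?_, ih2⟩
      intro x
      rw [ih1]
      constructor
      · rintro (h | ⟨j', hj', hc, hx⟩)
        · exact Or.inl h
        · exact Or.inr ⟨j', List.mem_cons_of_mem _ hj', hc, hx⟩
      · rintro (h | ⟨j', hj', hc, hx⟩)
        · exact Or.inl h
        · rcases List.mem_cons.mp hj' with rfl | hj'
          · exact absurd hc c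
          · exact Or.inr ⟨j', hj', hc, hx⟩

theorem pvScanBOuter (b : List (List Char)) (n : Int) :
    ∀ (is : List Int) (er : PySem.Set (Int × Int)), er.Nodup →
    (∀ x, x ∈ (is.foldl (fun er i =>
    (PySem.List.pyRange 0 (n-1) 1).foldl (fun er j =>
      if pvCell b i j ≠ '0' ∧ pvCell b i j = pvCell b (i+1) j ∧ pvCell b (i+1) j = pvCell b i (j+1) ∧
         pvCell b i (j+1) = pvCell b (i+1) (j+1) then
        ([((0:Int), (0:Int)), (0, 1), (1, 0), (1, 1)]).foldl (fun er d => er.add (i + d.1, j + d.2)) er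
      else er) er) er) ↔ x ∈ er ∨
        ∃ i ∈ is, ∃ j ∈ PySem.List.pyRange 0 (n-1) 1, pvCond b i j ∧ pvCells i j x) ∧
    (is.foldl (fun er i =>
    (PySem.List.pyRange 0 (n-1) 1).foldl (fun er j =>
      if pvCell b i j ≠ '0' ∧ pvCell b i j = pvCell b (i+1) j ∧ pvCell b (i+1) j = pvCell b i (j+1) ∧
         pvCell b i (j+1) = pvCell b (i+1) (j+1) then
        ([((0:Int), (0:Int)), (0, 1), (1, 0), (1, 1)]).foldl (fun er d => er.add (i + d.1, j + d.2)) er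
      else er) er) er).Nodup := by
  intro is
  induction is with
  | nil => intro er hnd; exact ⟨fun x => by simp, hnd⟩
  | cons i is ih =>
    intro er hnd
    rw [List.foldl_cons]
    obtain ⟨h1, h2⟩ := pvScanBInner b i (PySem.List.pyRange 0 (n-1) 1) er hnd
    obtain ⟨ih1, ih2⟩ := ih _ h2
    refine ⟨?_, ih2⟩
    intro x
    rw [ih1, h1 x]
    constructor
    · rintro ((h | ⟨j', hj', hc, hx⟩) | ⟨i', hi', j', hj', hc, hx⟩)
      · exact Or.inl h
      · exact Or.inr ⟨i, List.mem_cons_self, j', hj', hc, hx⟩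
      · exact Or.inr ⟨i', List.mem_cons_of_mem _ hi', j', hj', hc, hx⟩
    · rintro (h | ⟨i', hi', j', hj', hc, hx⟩)
      · exact Or.inl (Or.inl h)
      · rcases List.mem_cons.mp hi' with rfl | hi'
        · exact Or.inl (Or.inr ⟨j', hj', hc, hx⟩)
        · exact Or.inr ⟨i', hi', j', hj', hc, hx⟩

theorem pvScanB_spec (m n : Int) (b : List (List Char)) :
    (∀ x, x ∈ pvScanB m n b ↔
        ∃ i ∈ PySem.List.pyRange 0 (m-1) 1, ∃ j ∈ PySem.List.pyRange 0 (n-1) 1,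
          pvCond b i j ∧ pvCells i j x) ∧
    (pvScanB m n b).Nodup := by
  obtain ⟨h1, h2⟩ := pvScanBOuter b n (PySem.List.pyRange 0 (m-1) 1) PySem.Set.empty List.nodup_nil
  refine ⟨fun x => ?_, h2⟩
  unfold pvScanB
  rw [h1 x]
  simp [PySem.Set.empty]

theorem pvScan_mem_iff (m n : Int) (b : List (List Char)) (x : Int × Int) :
    x ∈ (pvScanA m n b).2 ↔ x ∈ pvScanB m n b := by
  rw [(pvScanA_spec m n b).1 x, (pvScanB_spec m n b).1 x]

theorem pvScan_fst_iff (m n : Int) (b : List (List Char)) :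
    (pvScanA m n b).1 = true ↔ pvScanB m n b ≠ [] := by
  rw [(pvScanA_spec m n b).2.1]
  constructor
  · rintro ⟨i, hi, j, hj, hc⟩
    intro hnil
    have : (i, j) ∈ pvScanB m n b := (pvScanB_spec m n b).1 _ |>.mpr ⟨i, hi, j, hj, hc, Or.inl rfl⟩
    rw [hnil] at this
    exact absurd this (List.not_mem_nil)
  · intro hne
    obtain ⟨x, hx⟩ := List.exists_mem_of_ne_nil _ hne
    obtain ⟨i, hi, j, hj, hc, _⟩ := (pvScanB_spec m n b).1 x |>.mp hx
    exact ⟨i, hi, j, hj, hc⟩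

theorem pvScanB_bounds (m n : Int) (b : List (List Char)) :
    ∀ x ∈ pvScanB m n b, 0 ≤ x.1 ∧ x.1 < m ∧ 0 ≤ x.2 ∧ x.2 < n := by
  intro x hx
  obtain ⟨i, hi, j, hj, hc, hcell⟩ := (pvScanB_spec m n b).1 x |>.mp hx
  rw [PySem.List.mem_pyRange_one] at hi hj
  rcases hcell with rfl | rfl | rfl | rfl <;> simp <;> omega
theorem pvFilterLenSplit {α : Type} (l : List α) (p : α → Bool) :
    (l.filter p).length + (l.filter (fun x => !(p x))).length = l.length := by
  induction l with
  | nil => simp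
  | cons x xs ih => by_cases h : p x <;> simp [h] <;> omega

theorem pvWriteCol {M N : Nat} {b : List (List Char)} {j : Int} {col : List Char}
    (hb : pvShp M N b) (hj0 : 0 ≤ j) (hjN : j < (N : Int)) (hcol : col.length = M) :
    ∀ (q : Nat), q ≤ M →
    pvShp M N ((PySem.List.pyRange 0 (q : Int) 1).foldl
      (fun b i => pvSetCell b i j (PySem.List.pyGetD col i '?')) b) ∧
    ∀ j', 0 ≤ j' → pvColOf ((PySem.List.pyRange 0 (q : Int) 1).foldl
      (fun b i => pvSetCell b i j (PySem.List.pyGetD col i '?')) b) j' =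
      if j' = j then col.take q ++ (pvColOf b j).drop q else pvColOf b j' := by
  intro q
  induction q with
  | zero =>
    intro _
    rw [PySem.List.pyRange_one_eq_nil (by omega)]
    refine ⟨hb, fun j' _ => ?_⟩
    simp only [List.foldl_nil, List.take_zero, List.nil_append, List.drop_zero]
    split <;> rename_i h
    · rw [h]
    · rfl
  | succ q ihq =>
    intro hqM
    have hq : q ≤ M := by omega
    obtain ⟨ihs, ihc⟩ := ihq hq
    have hcast : ((q + 1 : Nat) : Int) = (q : Int) + 1 := by push_cast; ring
    rw [hcast, PySem.List.pyRange_one_succ_right (by omega), List.foldl_append, List.foldl_cons,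
        List.foldl_nil]
    set bq := (PySem.List.pyRange 0 (q : Int) 1).foldl
      (fun b i => pvSetCell b i j (PySem.List.pyGetD col i '?')) b with hbq
    refine ⟨pvShp_setCell ihs (by omega) (by exact_mod_cast by omega), fun j' hj'0 => ?_⟩
    rw [pvColOf_setCell ihs.2 (by omega) (by rw [ihs.1]; exact_mod_cast by omega) hj0 hjN j' hj'0]
    by_cases hjj : j' = j
    · subst hjj
      rw [if_pos rfl, if_pos rfl, ihc j' hj'0, if_pos rfl]
      have hq' : q < col.length := by omega
      have hc0 : q < (pvColOf b j').length := by rw [pvLength_col, hb.1]; omega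
      rw [PySem.List.pyGetD_natCast col q '?', List.getD_eq_getElem col '?' hq']
      have htoNat : ((q : Int)).toNat = q := by omega
      rw [htoNat]
      rw [List.set_append, if_neg (by rw [List.length_take]; omega)]
      rw [List.length_take, show q - min q col.length = 0 by omega]
      rw [List.drop_eq_getElem_cons hc0, List.set_cons_zero]
      have hts : List.take (q+1) col = List.take q col ++ [getElem col q hq'] := by
        rw [List.take_add_one, List.getElem?_eq_getElem hq']
        rfl
      rw [hts, List.append_assoc, List.singleton_append]
    · rw [if_neg hjj, if_neg hjj, ihc j' hj'0, if_neg hjj]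

theorem pvKeep_len_le (c : List Char) (f : Nat → Bool) : (pvKeep c f).length ≤ c.length := by
  unfold pvKeep
  rw [List.length_map]
  calc (List.filter _ (List.range c.length)).length ≤ (List.range c.length).length :=
        List.length_filter_le _ _
    _ = c.length := List.length_range

theorem pvContains_decide {er : PySem.Set (Int × Int)} (y : Int × Int) :
    er.contains y = decide (y ∈ er) := by
  by_cases h : y ∈ er
  · rw [(PySem.Set.contains_iff er y).mpr h, decide_eq_true h]
  · rw [decide_eq_false h]
    exact Bool.eq_false_iff.mpr (fun hc => h ((PySem.Set.contains_iff er y).mp hc))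

theorem pvRebuildCol_spec {M N : Nat} {b : List (List Char)} {er : PySem.Set (Int × Int)}
    {m : Int} (hm : m = (M : Int)) (hb : pvShp M N b) {j : Int} (hj0 : 0 ≤ j) (hjN : j < (N : Int)) :
    pvShp M N (pvRebuildCol m er b j) ∧
    ∀ j', 0 ≤ j' → pvColOf (pvRebuildCol m er b j) j' =
      if j' = j then
        List.replicate (M - (pvKeep (pvColOf b j) (fun q => decide (((q : Int), j) ∈ er))).length) '0'
          ++ pvKeep (pvColOf b j) (fun q => decide (((q : Int), j) ∈ er))
      else pvColOf b j' := by
  subst hm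
  set K := pvKeep (pvColOf b j) (fun q => decide (((q : Int), j) ∈ er)) with hK
  have hrange : PySem.List.pyRange 0 ((M : Nat) : Int) 1 = (List.range M).map (fun k : Nat => (k : Int)) := by
    rw [PySem.List.pyRange_one]
    have h1 : (((M : Nat) : Int) - 0).toNat = M := by omega
    rw [h1]
    apply List.map_congr_left
    intro k _
    simp
  have hcol0 : ((PySem.List.pyRange 0 ((M : Nat) : Int) 1).filter (fun i => !(er.contains (i, j)))).map
      (fun i => pvCell b i j) = K := by
    rw [hrange, List.filter_map, List.map_map, hK]
    unfold pvKeep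
    rw [pvLength_col, hb.1]
    have hfe : (List.range M).filter ((fun i => !(er.contains (i, j))) ∘ (fun k : Nat => (k : Int)))
        = (List.range M).filter (fun q : Nat => !(decide (((q : Int), j) ∈ er))) := by
      apply List.filter_congr
      intro q _
      simp only [Function.comp_apply]
      rw [pvContains_decide]
    rw [hfe]
    apply List.map_congr_left
    intro q hq
    have hq' : q < M := by
      have := List.mem_of_mem_filter hq
      simpa [List.mem_range] using this
    simp only [Function.comp_apply]
    rw [pvCell_col, PySem.List.pyGetD_natCast]
  have hKle : K.length ≤ M := by
    have := pvKeep_len_le (pvColOf b j) (fun q => decide (((q : Int), j) ∈ er))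
    rw [pvLength_col, hb.1] at this
    rw [hK]
    exact this
  have hpadlen : (List.replicate (((M : Int) - (K.length : Int)).toNat) '0' ++ K).length = M := by
    rw [List.length_append, List.length_replicate]
    omega
  have hWC := pvWriteCol (b := b) (j := j)
    (col := List.replicate (((M : Int) - (K.length : Int)).toNat) '0' ++ K)
    hb hj0 hjN hpadlen M (le_refl M)
  have hfold : pvRebuildCol (M : Int) er b j = (PySem.List.pyRange 0 ((M : Nat) : Int) 1).foldl
      (fun b i => pvSetCell b i j (PySem.List.pyGetD
        (List.replicate (((M : Int) - (K.length : Int)).toNat) '0' ++ K) i '?')) b := by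
    simp only [pvRebuildCol]
    rw [hcol0]
  rw [hfold]
  refine ⟨hWC.1, fun j' hj'0 => ?_⟩
  rw [hWC.2 j' hj'0]
  by_cases hjj : j' = j
  · rw [if_pos hjj, if_pos hjj]
    rw [List.take_of_length_le (by rw [hpadlen]), List.drop_of_length_le (by rw [pvLength_col, hb.1])]
    rw [List.append_nil]
    congr 2
    omega
  · rw [if_neg hjj, if_neg hjj]
theorem pvBoardExt {M N : Nat} {b1 b2 : List (List Char)}
    (h1 : pvShp M N b1) (h2 : pvShp M N b2)
    (hcols : ∀ jN : Nat, jN < N → pvColOf b1 ((jN : Nat) : Int) = pvColOf b2 ((jN : Nat) : Int)) :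
    b1 = b2 := by
  apply List.ext_getElem
  · rw [h1.1, h2.1]
  · intro r hr1 hr2
    apply List.ext_getElem
    · rw [h1.2 _ (List.getElem_mem _), h2.2 _ (List.getElem_mem _)]
    · intro jN hj1 hj2
      have hjN : jN < N := by rw [h1.2 _ (List.getElem_mem _)] at hj1; exact hj1
      have hcol := hcols jN hjN
      have e1 : (pvColOf b1 ((jN : Nat) : Int)).length = b1.length := pvLength_col b1 _
      have hr1' : r < (pvColOf b1 ((jN : Nat) : Int)).length := by omega
      have hr2' : r < (pvColOf b2 ((jN : Nat) : Int)).length := by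
        rw [pvLength_col]; omega
    -- column entry r equals row entry jN
      have g1 : getElem (pvColOf b1 ((jN : Nat) : Int)) r hr1' = getElem (b1[r]) jN hj1 := by
        simp only [pvColOf, List.getElem_map]
        rw [PySem.List.pyGetD_natCast, List.getD_eq_getElem _ '?' hj1]
      have g2 : getElem (pvColOf b2 ((jN : Nat) : Int)) r hr2' = getElem (b2[r]) jN hj2 := by
        simp only [pvColOf, List.getElem_map]
        rw [PySem.List.pyGetD_natCast, List.getD_eq_getElem _ '?' hj2]
      rw [← g1, ← g2]
      exact pvGetEq' _ _ hr1' hr2' hcol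

theorem pvGravB_fold {M N : Nat} {b : List (List Char)} {er : PySem.Set (Int × Int)} {m : Int}
    (hm : m = (M : Int)) (hb : pvShp M N b) :
    ∀ (q : Nat), q ≤ N →
    pvShp M N ((PySem.List.pyRange 0 (q : Int) 1).foldl (pvRebuildCol m er) b) ∧
    ∀ j', 0 ≤ j' → pvColOf ((PySem.List.pyRange 0 (q : Int) 1).foldl (pvRebuildCol m er) b) j' =
      if j' < (q : Int) then
        List.replicate (M - (pvKeep (pvColOf b j') (fun qq => decide (((qq : Int), j') ∈ er))).length) '0'
          ++ pvKeep (pvColOf b j') (fun qq => decide (((qq : Int), j') ∈ er))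
      else pvColOf b j' := by
  intro q
  induction q with
  | zero =>
    intro _
    rw [PySem.List.pyRange_one_eq_nil (by omega)]
    refine ⟨hb, fun j' hj'0 => ?_⟩
    rw [if_neg (by omega)]
    rfl
  | succ q ihq =>
    intro hqN
    obtain ⟨ihs, ihc⟩ := ihq (by omega)
    have hcast : ((q + 1 : Nat) : Int) = (q : Int) + 1 := by push_cast; ring
    rw [hcast, PySem.List.pyRange_one_succ_right (by omega), List.foldl_append, List.foldl_cons,
        List.foldl_nil]
    set bq := (PySem.List.pyRange 0 (q : Int) 1).foldl (pvRebuildCol m er) b with hbq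
    have hspec := pvRebuildCol_spec (er := er) hm ihs (j := (q : Int)) (by omega)
      (by exact_mod_cast by omega)
    have hcolq : pvColOf bq ((q : Nat) : Int) = pvColOf b ((q : Nat) : Int) := by
      rw [ihc _ (by omega), if_neg (by omega)]
    refine ⟨hspec.1, fun j' hj'0 => ?_⟩
    rw [hspec.2 j' hj'0]
    by_cases hjj : j' = (q : Int)
    · rw [if_pos hjj, if_pos (by omega), hjj, hcolq]
    · rw [if_neg hjj, ihc j' hj'0]
      by_cases hlt : j' < (q : Int)
      · rw [if_pos hlt, if_pos (by omega)]
      · rw [if_neg hlt, if_neg (by omega)]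
theorem pvRound {M N : Nat} {m n : Int} (hm : m = (M : Int)) (hn : n = (N : Int))
    {b : List (List Char)} (hb : pvShp M N b) (a : Int) :
    ((PySem.List.sorted (pvScanA m n b).2 (fun p => toLex p) false).foldl pvGravA (a, b)).1
      = a + ((pvScanB m n b).length : Int) ∧
    ((PySem.List.sorted (pvScanA m n b).2 (fun p => toLex p) false).foldl pvGravA (a, b)).2
      = (PySem.List.pyRange 0 n 1).foldl (pvRebuildCol m (pvScanB m n b)) b ∧
    pvShp M N ((PySem.List.pyRange 0 n 1).foldl (pvRebuildCol m (pvScanB m n b)) b) := by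
  subst hm; subst hn
  set m := ((M : Nat) : Int) with hm
  set n := ((N : Nat) : Int) with hn
  set er := pvScanB m n b with her
  set pairs := PySem.List.sorted (pvScanA m n b).2 (fun p => toLex p) false with hpairs
  have hperm : pairs.Perm (pvScanA m n b).2 := PySem.List.sorted_perm _ _ _
  have hndA : (pvScanA m n b).2.Nodup := (pvScanA_spec m n b).2.2
  have hndB : er.Nodup := (pvScanB_spec m n b).2
  have hndP : pairs.Nodup := hperm.nodup_iff.mpr hndA
  have hmemP : ∀ x, x ∈ pairs ↔ x ∈ er := fun x => by rw [hperm.mem_iff, pvScan_mem_iff]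
  have hbnd : ∀ p ∈ pairs, 0 ≤ p.1 ∧ p.1 < (M : Int) ∧ 0 ≤ p.2 ∧ p.2 < (N : Int) := by
    intro p hp
    exact pvScanB_bounds m n b p ((hmemP p).mp hp)
  have hlen : pairs.length = er.length := by
    rw [hperm.length_eq]
    exact ((List.perm_ext_iff_of_nodup hndA hndB).mpr (fun x => pvScan_mem_iff m n b x)).length_eq
  obtain ⟨hfst, hshpA, hcolsA⟩ := pvGravFold (M := M) (N := N) pairs a b hb hbnd
  have hgB := pvGravB_fold (er := er) (b := b) rfl hb N (le_refl N)
  refine ⟨by rw [hfst, hlen], ?_, hgB.1⟩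
  apply pvBoardExt hshpA hgB.1
  intro jN hjN
  set j' := ((jN : Nat) : Int) with hj'
  rw [hcolsA j' (by omega), hgB.2 j' (by omega), if_pos (by omega)]
  set c0 := pvColOf b j' with hc0
  have hc0l : c0.length = M := by rw [hc0, pvLength_col, hb.1]
  set rows := (pairs.filter (fun p => p.2 == j')).map Prod.fst with hrows
  have hfoldmap : (pairs.filter (fun p => p.2 == j')).foldl
      (fun c p => '0' :: c.eraseIdx p.1.toNat) c0 =
      rows.foldl (fun c r => '0' :: c.eraseIdx r.toNat) c0 := by
    rw [hrows, List.foldl_map]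
  have hplex : pairs.Pairwise (fun p q => toLex p < toLex q) := by
    have hle : pairs.Pairwise (fun p q => toLex p ≤ toLex q) :=
      PySem.List.sorted_pairwise (pvScanA m n b).2 (fun p => toLex p)
    exact (hle.and hndP).imp (fun {x y} h => lt_of_le_of_ne h.1 (fun he => h.2 (toLex_inj.mp he)))
  have hpf : (pairs.filter (fun p => p.2 == j')).Pairwise (fun p q => toLex p < toLex q) :=
    hplex.sublist List.filter_sublist
  have hrowlt : rows.Pairwise (· < ·) := by
    rw [hrows, List.pairwise_map]
    apply List.Pairwise.imp_of_mem ?_ hpf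
    intro p q hp hq hlt
    have hp2 : p.2 = j' := by simpa using (List.mem_filter.mp hp).2
    have hq2 : q.2 = j' := by simpa using (List.mem_filter.mp hq).2
    rcases Prod.Lex.lt_iff.mp hlt with h | h
    · exact h
    · exfalso
      have : p.2 < q.2 := h.2
      omega
  have hrowbnd : ∀ r ∈ rows, 0 ≤ r ∧ r < (c0.length : Int) := by
    intro r hr
    rw [hrows] at hr
    obtain ⟨p, hp, rfl⟩ := List.mem_map.mp hr
    have := hbnd p (List.mem_of_mem_filter hp)
    rw [hc0l]
    exact ⟨this.1, this.2.1⟩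
  rw [hfoldmap, pvCstepFold rows c0 hrowlt hrowbnd]
  have hmemrows : ∀ r : Int, r ∈ rows ↔ (r, j') ∈ er := by
    intro r
    rw [hrows]
    constructor
    · intro hr
      obtain ⟨p, hp, rfl⟩ := List.mem_map.mp hr
      have h2 : p.2 = j' := by simpa using (List.mem_filter.mp hp).2
      have h1 : p ∈ pairs := List.mem_of_mem_filter hp
      rw [← h2, Prod.mk.eta]
      exact (hmemP p).mp h1
    · intro hr
      exact List.mem_map.mpr ⟨(r, j'), List.mem_filter.mpr ⟨(hmemP _).mpr hr, by simp⟩, rfl⟩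
  have hpred : (fun q : Nat => decide ((q : Int) ∈ rows)) =
      (fun qq : Nat => decide (((qq : Int), j') ∈ er)) := by
    funext q
    rw [decide_eq_decide]
    exact hmemrows _
  rw [hpred]
  have hndrows : rows.Nodup := by
    rw [hrows]
    apply List.Nodup.map_on
    · intro x hx y hy hxy
      have hx2 : x.2 = j' := by simpa using (List.mem_filter.mp hx).2
      have hy2 : y.2 = j' := by simpa using (List.mem_filter.mp hy).2
      exact Prod.ext hxy (hx2.trans hy2.symm)
    · exact hndP.sublist List.filter_sublist
  have hrows2 : rows.Perm (((List.range M).filter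
      (fun qq : Nat => decide (((qq : Int), j') ∈ er))).map (fun k : Nat => (k : Int))) := by
    apply (List.perm_ext_iff_of_nodup hndrows ?_).mpr
    · intro r
      rw [hmemrows]
      constructor
      · intro hr
        have hb2 := pvScanB_bounds m n b (r, j') hr
        apply List.mem_map.mpr
        refine ⟨r.toNat, List.mem_filter.mpr ⟨by simp only [List.mem_range]; omega, ?_⟩, by omega⟩
        rw [show ((r.toNat : Nat) : Int) = r by omega]
        exact decide_eq_true hr
      · intro hr
        obtain ⟨k, hk, rfl⟩ := List.mem_map.mp hr
        exact of_decide_eq_true (List.mem_filter.mp hk).2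
    · apply List.Nodup.map_on
      · intro x _ y _ h
        exact_mod_cast h
      · exact (List.nodup_range).filter _
  have hlenr : rows.length = ((List.range M).filter
      (fun qq : Nat => decide (((qq : Int), j') ∈ er))).length := by
    rw [hrows2.length_eq, List.length_map]
  have hKlen : (pvKeep c0 (fun qq : Nat => decide (((qq : Int), j') ∈ er))).length
      = M - rows.length := by
    unfold pvKeep
    rw [List.length_map, hc0l, hlenr]
    have := pvFilterLenSplit (List.range M) (fun qq : Nat => decide (((qq : Int), j') ∈ er))
    rw [List.length_range] at this
    beta_reduce
    omega
  have hrle : rows.length ≤ M := by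
    rw [hlenr]
    calc _ ≤ (List.range M).length := List.length_filter_le _ _
      _ = M := List.length_range
  rw [hKlen, show M - (M - rows.length) = rows.length from by omega]
-- m ≤ 1 or n ≤ 1: the scan ranges are empty, both loops return their accumulator unchanged
theorem pvScan_degenerate (m n : Int) (g : List (List Char)) (h : m ≤ 1 ∨ n ≤ 1) :
    pvScanA m n g = (false, PySem.Set.empty) ∧ pvScanB m n g = PySem.Set.empty := by
  rcases h with h | h
  · constructor
    · unfold pvScanA
      rw [PySem.List.pyRange_one_eq_nil (by omega : m - 1 ≤ 0)]
      rfl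
    · unfold pvScanB
      rw [PySem.List.pyRange_one_eq_nil (by omega : m - 1 ≤ 0)]
      rfl
  · constructor
    · unfold pvScanA
      rw [PySem.List.pyRange_one_eq_nil (by omega : n - 1 ≤ 0)]
      generalize PySem.List.pyRange 0 (m-1) 1 = is
      induction is with
      | nil => rfl
      | cons i is ih => rw [List.foldl_cons]; exact ih
    · unfold pvScanB
      rw [PySem.List.pyRange_one_eq_nil (by omega : n - 1 ≤ 0)]
      generalize PySem.List.pyRange 0 (m-1) 1 = is
      induction is with
      | nil => rfl
      | cons i is ih => rw [List.foldl_cons]; exact ih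

theorem pvLoop_degenerate (m n : Int) (g : List (List Char)) (h : m ≤ 1 ∨ n ≤ 1) (f : Nat) (a : Int) :
    pvLoopA m n (f + 1) g a = a ∧ pvLoopB m n (f + 1) g a = a := by
  obtain ⟨hsA, hsB⟩ := pvScan_degenerate m n g h
  constructor
  · simp only [pvLoopA, hsA,
      (show PySem.List.sorted (PySem.Set.empty : PySem.Set (Int × Int)) (fun p => toLex p) false
          = [] from rfl)]
    simp
  · simp only [pvLoopB, hsB]
    simp [PySem.Set.empty]

theorem pvLoop_eq {M N : Nat} {m n : Int} (hm : m = (M : Int)) (hn : n = (N : Int)) :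
    ∀ (fuel : Nat) (b : List (List Char)) (a : Int), pvShp M N b →
    pvLoopA m n fuel b a = pvLoopB m n fuel b a := by
  intro fuel
  induction fuel with
  | zero => intro b a _; rfl
  | succ f ih =>
    intro b a hb
    obtain ⟨h1, h2, h3⟩ := pvRound hm hn hb a
    simp only [pvLoopA, pvLoopB]
    by_cases hchk : (pvScanA m n b).1 = true
    · rw [if_pos hchk]
      have hne : pvScanB m n b ≠ [] := (pvScan_fst_iff m n b).mp hchk
      rw [if_neg (by simpa [List.isEmpty_iff] using hne)]
      rw [h1, h2]
      exact ih _ _ h3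
    · rw [if_neg hchk]
      have hnil : pvScanB m n b = [] := by
        by_contra hne
        exact hchk ((pvScan_fst_iff m n b).mpr hne)
      rw [if_pos (by simp [hnil])]
      rw [h1, hnil]
      simp

theorem solution_spec : Claim_equal_solution := by
  unfold Claim_equal_solution Spec_solution
  intro m n board _ hpre
  unfold solution solution_alt
  rcases hpre with hdeg | ⟨hm, hrows⟩
  · obtain ⟨hA, hB⟩ := pvLoop_degenerate m n (board.map String.toList) hdeg
      (m.toNat * n.toNat) 0
    rw [hA, hB]
  · rcases board with _ | ⟨s0, rest⟩
    · have hm0 : m = 0 := by simpa using hm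
      subst hm0
      obtain ⟨hA, hB⟩ := pvLoop_degenerate 0 n (([] : List String).map String.toList)
        (Or.inl (by omega)) ((0:Int).toNat * n.toNat) 0
      rw [hA, hB]
    · have hs0 := hrows s0 List.mem_cons_self
      have hlen0 : PySem.Str.len s0 = ((s0.toList.length : Nat) : Int) := by simp [PySem.Str.len]
      have hn0 : 0 ≤ n := by omega
      apply pvLoop_eq (M := m.toNat) (N := n.toNat) (by omega) (by omega)
      constructor
      · rw [List.length_map]
        have : m = ((s0 :: rest).length : Int) := hm
        omega
      · intro r hr
        obtain ⟨s, hs, rfl⟩ := List.mem_map.mp hr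
        have h1 := hrows s hs
        have h2 : PySem.Str.len s = ((s.toList.length : Nat) : Int) := by simp [PySem.Str.len]
        omega
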